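-- pv_equiv track=rewrite | github.com/dlangleychi/py110 | small_problems/easy_5/staggered_case_part_2.py | staggered_case
-- ===== SOURCE A (Python) =====
-- def staggered_case(string):
--     result = ''
--     next_is_upper = True
--
--     for char in string:
--         if char.isalpha():
--             func = char.upper if next_is_upper else char.lower
--             result += func()
--             next_is_upper = not next_is_upper
--         else:
--             result += char
--
--     return result
-- ===== SOURCE B (Python) =====
-- def staggered_case(string):
--     letters = [char for char in string if char.isalpha()]
--     transformed = [char.upper() if i % 2 == 0 else char.lower()
--                    for i, char in enumerate(letters)]
--     it = iter(transformed)
--     return ''.join(next(it) if char.isalpha() else char for char in string)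
-- ===== Notes on version B (the rewrite author's own statement) =====
-- stated objective: alternative
-- what changed: Replaces the single stateful boolean scan with a three-phase pipeline: collect the alphabetic characters, case them by index parity via enumerate, then splice them back into the original string positions.
import Mathlib
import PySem

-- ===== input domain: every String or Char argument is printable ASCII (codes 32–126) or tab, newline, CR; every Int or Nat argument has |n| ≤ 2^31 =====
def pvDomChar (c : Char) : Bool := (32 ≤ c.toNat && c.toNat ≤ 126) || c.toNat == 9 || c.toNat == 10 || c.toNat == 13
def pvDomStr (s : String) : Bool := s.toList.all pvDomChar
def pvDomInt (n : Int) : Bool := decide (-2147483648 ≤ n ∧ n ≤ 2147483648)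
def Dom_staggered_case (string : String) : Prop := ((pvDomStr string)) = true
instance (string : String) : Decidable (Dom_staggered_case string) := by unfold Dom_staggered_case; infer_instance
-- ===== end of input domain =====

-- B replaces A's stateful boolean scan with a collect/case-by-index-parity/splice-back pipeline; objective: alternative.

-- ===== PORT A =====
-- literal transliteration of A: one pass, accumulator (result, next_is_upper)
def staggered_case (string : String) : String :=
  let st := string.toList.foldl
    (fun (acc : List Char × Bool) c =>
      if PySem.Chars.isalpha c then
        (acc.1 ++ [if acc.2 then PySem.Chars.upperChar c else PySem.Chars.lowerChar c], !acc.2)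
      else
        (acc.1 ++ [c], acc.2))
    ([], true)
  String.ofList st.1

-- ===== PORT B =====
-- splice the transformed letters back over the alphabetic positions ('next(it)' never
-- exhausts since the iterator holds exactly one letter per alphabetic position; the
-- [] branch is unreachable on B's call)
def pvSplice : List Char → List Char → List Char
  | [], _ => []
  | c :: cs, ts =>
    if PySem.Chars.isalpha c then
      match ts with
      | t :: ts' => t :: pvSplice cs ts'
      | [] => pvSplice cs []
    else
      c :: pvSplice cs ts

def staggered_case_alt (string : String) : String :=
  let letters := string.toList.filter PySem.Chars.isalpha
  let transformed := (PySem.List.enumerate letters).map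
    (fun p => if PySem.Int.mod p.1 2 == 0 then PySem.Chars.upperChar p.2 else PySem.Chars.lowerChar p.2)
  String.ofList (pvSplice string.toList transformed)

-- ===== PRECONDITION & SPEC =====
def Spec_staggered_case (string : String) (out : String) : Prop := out = staggered_case_alt string
instance (string : String) (out : String) : Decidable (Spec_staggered_case string out) := by unfold Spec_staggered_case; infer_instance

-- ===== CLAIM (what is proved, stated in full; the proofs are below) =====
def Claim_equal_staggered_case : Prop := ∀ (string : String), Dom_staggered_case string → Spec_staggered_case string (staggered_case string)

-- ===== LEMMAS AND PROOFS =====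

-- A's loop body, accumulator stripped: the list A appends for input cs with flag b
def pvGoA : List Char → Bool → List Char
  | [], _ => []
  | c :: cs, b =>
    if PySem.Chars.isalpha c then
      (if b then PySem.Chars.upperChar c else PySem.Chars.lowerChar c) :: pvGoA cs (!b)
    else
      c :: pvGoA cs b

theorem pvFoldA (cs : List Char) (acc : List Char) (b : Bool) :
    (cs.foldl
      (fun (acc : List Char × Bool) c =>
        if PySem.Chars.isalpha c then
          (acc.1 ++ [if acc.2 then PySem.Chars.upperChar c else PySem.Chars.lowerChar c], !acc.2)
        else
          (acc.1 ++ [c], acc.2))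
      (acc, b)).1 = acc ++ pvGoA cs b := by
  induction cs generalizing acc b with
  | nil => simp [pvGoA]
  | cons c cs ih =>
    by_cases h : PySem.Chars.isalpha c = true <;>
      simp [pvGoA, h, ih, List.append_assoc]

theorem pvMod_succ (s : Int) : PySem.Int.mod (s + 1) 2 = if PySem.Int.mod s 2 = 0 then 1 else 0 := by
  rw [show PySem.Int.mod (s + 1) 2 = (s + 1) % 2 from PySem.Int.mod_eq_emod_of_pos (by norm_num),
      show PySem.Int.mod s 2 = s % 2 from PySem.Int.mod_eq_emod_of_pos (by norm_num)]
  split_ifs with h <;> omega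

theorem pvSpliceGo (cs : List Char) (s : Int) (b : Bool)
    (hb : b = (PySem.Int.mod s 2 == 0)) :
    pvSplice cs ((PySem.List.enumerate (cs.filter PySem.Chars.isalpha) s).map
      (fun p => if PySem.Int.mod p.1 2 == 0 then PySem.Chars.upperChar p.2 else PySem.Chars.lowerChar p.2))
      = pvGoA cs b := by
  induction cs generalizing s b with
  | nil => simp [pvSplice, pvGoA]
  | cons c cs ih =>
    by_cases h : PySem.Chars.isalpha c = true
    · simp only [pvGoA, pvSplice, h, if_true, List.filter_cons_of_pos h,
        PySem.List.enumerate_cons, List.map_cons]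
      have hstep : (!b) = (PySem.Int.mod (s + 1) 2 == 0) := by
        subst hb; rw [pvMod_succ]
        by_cases h2 : PySem.Int.mod s 2 = 0
        · rw [if_pos h2, h2]; decide
        · rw [if_neg h2, show (PySem.Int.mod s 2 == 0) = false from beq_eq_false_iff_ne.mpr h2]
          decide
      rw [ih (s + 1) (!b) hstep, hb]
    · simp only [pvGoA, pvSplice, h, if_false, List.filter_cons_of_neg h, Bool.false_eq_true]
      rw [ih s b hb]

-- ===== VERDICT (by name: the statement is the Claim_ definition above) =====
theorem staggered_case_spec : Claim_equal_staggered_case := by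
  intro string _
  show staggered_case string = staggered_case_alt string
  simp only [staggered_case, staggered_case_alt]
  rw [pvFoldA, pvSpliceGo string.toList 0 true (by decide), List.nil_append]
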